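-- pv_equiv track=rewrite | github.com/sikdars25/qadam_backend | ai_service.py | detect_diagram_reference
-- ===== SOURCE A (Python) =====
-- def detect_diagram_reference(text):
--     """Detect if text references a diagram or figure"""
--     text_lower = text.lower()
--
--     diagram_keywords = [
--         'diagram', 'figure', 'graph', 'chart', 'image', 'picture',
--         'illustration', 'shown', 'given below', 'above', 'following figure',
--         'circuit', 'table', 'map', 'drawing'
--     ]
--
--     return any(keyword in text_lower for keyword in diagram_keywords)
-- ===== SOURCE B (Python) =====
-- def detect_diagram_reference(text):
--     """Detect if text references a diagram or figure (single left-to-right scan)"""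
--     keywords = [
--         'diagram', 'figure', 'graph', 'chart', 'image', 'picture',
--         'illustration', 'shown', 'given below', 'above', 'following figure',
--         'circuit', 'table', 'map', 'drawing'
--     ]
--     t = text.lower()
--     for i in range(len(t)):
--         for k in keywords:
--             if t.startswith(k, i):
--                 return True
--     return False
-- ===== Notes on version B (the rewrite author's own statement) =====
-- stated objective: alternative
-- what changed: Replaces the 15 independent per-keyword substring scans of the lowered text with a single left-to-right pass that checks at each position whether any keyword starts there.
import Mathlib
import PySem

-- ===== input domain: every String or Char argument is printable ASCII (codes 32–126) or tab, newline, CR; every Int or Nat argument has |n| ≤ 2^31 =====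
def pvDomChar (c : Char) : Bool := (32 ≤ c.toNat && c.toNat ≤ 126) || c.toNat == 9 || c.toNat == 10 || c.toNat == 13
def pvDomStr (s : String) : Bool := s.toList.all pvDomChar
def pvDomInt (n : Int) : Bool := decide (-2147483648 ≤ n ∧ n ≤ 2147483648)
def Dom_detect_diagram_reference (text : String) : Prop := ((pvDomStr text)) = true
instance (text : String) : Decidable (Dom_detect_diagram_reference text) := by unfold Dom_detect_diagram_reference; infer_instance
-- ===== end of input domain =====

-- ===== PORT A =====
-- B does a single left-to-right scan with prefix checks instead of A's per-keyword substring scans.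
def kwsA : List String :=
  ["diagram", "figure", "graph", "chart", "image", "picture",
   "illustration", "shown", "given below", "above", "following figure",
   "circuit", "table", "map", "drawing"]

def detect_diagram_reference (text : String) : Bool :=
  let text_lower := PySem.Str.lower text
  kwsA.any (fun keyword => PySem.Str.isIn keyword text_lower)

-- ===== PORT B =====
def kwsB : List String :=
  ["diagram", "figure", "graph", "chart", "image", "picture",
   "illustration", "shown", "given below", "above", "following figure",
   "circuit", "table", "map", "drawing"]

-- the scan `for i in range(len(t)): for k in keywords: if t.startswith(k, i)`:
-- recursion over the successive suffixes of t
def scanB (kws : List String) : List Char → Bool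
  | [] => false
  | c :: rest =>
      if kws.any (fun k => PySem.Chars.startswith (c :: rest) k.toList) then true
      else scanB kws rest

def detect_diagram_reference_alt (text : String) : Bool :=
  scanB kwsB (PySem.Chars.lower text.toList)

-- ===== PRECONDITION & SPEC =====
def Spec_detect_diagram_reference (text : String) (out : Bool) : Prop := out = detect_diagram_reference_alt text
instance (text : String) (out : Bool) : Decidable (Spec_detect_diagram_reference text out) := by unfold Spec_detect_diagram_reference; infer_instance

-- ===== CLAIM (what is proved, stated in full; the proofs are below) =====
def Claim_equal_detect_diagram_reference : Prop := ∀ (text : String), Dom_detect_diagram_reference text → Spec_detect_diagram_reference text (detect_diagram_reference text)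

-- ===== LEMMAS AND PROOFS =====

lemma scanB_eq (kws : List String) (h : ∀ k ∈ kws, k.toList ≠ []) (t : List Char) :
    scanB kws t = kws.any (fun k => PySem.Chars.isIn k.toList t) := by
  induction t with
  | nil =>
      simp only [scanB]
      symm
      rw [List.any_eq_false]
      intro k hk
      rw [PySem.Chars.isIn_iff_infix]
      intro hinf
      exact h k hk (List.eq_nil_of_infix_nil hinf)
  | cons c rest ih =>
      have hpt : ∀ k : List Char,
          PySem.Chars.isIn k (c :: rest)
            = (PySem.Chars.startswith (c :: rest) k || PySem.Chars.isIn k rest) := by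
        intro k
        rw [Bool.eq_iff_iff, Bool.or_eq_true, PySem.Chars.isIn_iff_infix,
            PySem.Chars.startswith_iff, PySem.Chars.isIn_iff_infix]
        exact List.infix_cons_iff
      simp only [scanB, ih]
      cases hc : kws.any (fun k => PySem.Chars.startswith (c :: rest) k.toList) with
      | true =>
          simp only [if_true]
          symm
          rw [List.any_eq_true]
          obtain ⟨k, hk, hs⟩ := List.any_eq_true.mp hc
          exact ⟨k, hk, by simp [hpt, hs]⟩
      | false =>
          simp only [Bool.false_eq_true, if_false]
          rw [Bool.eq_iff_iff, List.any_eq_true, List.any_eq_true]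
          have hcf := List.any_eq_false.mp hc
          constructor
          · rintro ⟨k, hk, hik⟩
            exact ⟨k, hk, by simp [hpt, hik]⟩
          · rintro ⟨k, hk, hik⟩
            rw [hpt] at hik
            simp only [Bool.or_eq_true] at hik
            rcases hik with hik | hik
            · exact absurd hik (by simp [hcf k hk])
            · exact ⟨k, hk, hik⟩

-- ===== VERDICT (by name: the statement is the Claim_ definition above) =====
theorem detect_diagram_reference_spec : Claim_equal_detect_diagram_reference := by
  intro text _
  unfold Spec_detect_diagram_reference detect_diagram_reference detect_diagram_reference_alt
  rw [scanB_eq kwsB (by decide)]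
  simp [kwsA, kwsB, PySem.Str.isIn]
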